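-- pv_equiv track=rewrite | github.com/paiml/hugging-face-ground-truth-corpus | src/hf_gtc/hub/datasets.py | compare_dataset_schemas
-- ===== SOURCE A (Python) =====
-- def compare_dataset_schemas(
--     schema_a: dict[str, str],
--     schema_b: dict[str, str],
-- ) -> dict[str, dict[str, str | None]]:
--     """Compare two dataset schemas.
--
--     Args:
--         schema_a: First schema (feature name to type).
--         schema_b: Second schema (feature name to type).
--
--     Returns:
--         Dictionary with comparison results for each field.
--
--     Examples:
--         >>> schema_a = {"text": "string", "label": "int64"}
--         >>> schema_b = {"text": "string", "score": "float32"}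
--         >>> result = compare_dataset_schemas(schema_a, schema_b)
--         >>> result["text"]["status"]
--         'match'
--         >>> result["label"]["status"]
--         'only_in_a'
--         >>> result["score"]["status"]
--         'only_in_b'
--
--         >>> # Type mismatch detection
--         >>> schema_a = {"value": "int64"}
--         >>> schema_b = {"value": "float32"}
--         >>> result = compare_dataset_schemas(schema_a, schema_b)
--         >>> result["value"]["status"]
--         'type_mismatch'
--     """
--     all_fields = set(schema_a.keys()) | set(schema_b.keys())
--
--     result: dict[str, dict[str, str | None]] = {}
--     for field in all_fields:
--         type_a = schema_a.get(field)
--         type_b = schema_b.get(field)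
--
--         if type_a is None:
--             result[field] = {
--                 "status": "only_in_b",
--                 "type_a": None,
--                 "type_b": type_b,
--             }
--         elif type_b is None:
--             result[field] = {
--                 "status": "only_in_a",
--                 "type_a": type_a,
--                 "type_b": None,
--             }
--         elif type_a == type_b:
--             result[field] = {
--                 "status": "match",
--                 "type_a": type_a,
--                 "type_b": type_b,
--             }
--         else:
--             result[field] = {
--                 "status": "type_mismatch",
--                 "type_a": type_a,
--                 "type_b": type_b,
--             }
--
--     return result
-- ===== SOURCE B (Python) =====
-- def compare_dataset_schemas(
--     schema_a: dict[str, str],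
--     schema_b: dict[str, str],
-- ) -> dict[str, dict[str, str | None]]:
--     """Compare two dataset schemas by two ordered passes over the dicts,
--     with no key-set union and no per-field None checks."""
--     result: dict[str, dict[str, str | None]] = {}
--     for field, type_a in schema_a.items():
--         if field in schema_b:
--             type_b = schema_b[field]
--             row = {
--                 "status": "match" if type_a == type_b else "type_mismatch",
--                 "type_a": type_a,
--                 "type_b": type_b,
--             }
--         else:
--             row = {"status": "only_in_a", "type_a": type_a, "type_b": None}
--         result[field] = row
--     for field, type_b in [item for item in schema_b.items() if item[0] not in schema_a]:
--         result[field] = {"status": "only_in_b", "type_a": None, "type_b": type_b}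
--     return result
-- ===== Notes on version B (the rewrite author's own statement) =====
-- stated objective: alternative
-- what changed: Instead of building the union of the two key sets and classifying every field by None-checks on two .get() lookups, B makes two ordered passes: one over schema_a's items (comparing against schema_b only where the key is present) and one over schema_b's items filtered to keys absent from schema_a.
import Mathlib
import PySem

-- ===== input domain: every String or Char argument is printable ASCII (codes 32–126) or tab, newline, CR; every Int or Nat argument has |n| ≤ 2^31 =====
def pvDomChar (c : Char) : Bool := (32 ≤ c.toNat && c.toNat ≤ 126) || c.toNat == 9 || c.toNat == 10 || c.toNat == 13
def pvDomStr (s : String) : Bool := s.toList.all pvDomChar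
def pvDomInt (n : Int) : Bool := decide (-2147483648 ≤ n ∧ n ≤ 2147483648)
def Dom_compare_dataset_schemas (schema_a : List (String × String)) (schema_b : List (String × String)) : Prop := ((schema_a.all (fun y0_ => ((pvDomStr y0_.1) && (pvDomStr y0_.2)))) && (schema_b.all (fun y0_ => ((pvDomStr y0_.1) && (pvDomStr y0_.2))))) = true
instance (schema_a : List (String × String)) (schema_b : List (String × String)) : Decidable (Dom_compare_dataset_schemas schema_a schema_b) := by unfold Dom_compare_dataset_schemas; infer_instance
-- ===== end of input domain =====

-- B replaces A's key-set union + per-field None-check classification by two ordered passes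
-- over the dicts themselves (alternative decomposition, same cost).
-- Python A iterates a set (hash order) only to BUILD the result dict, which is compared as a
-- dict (order-insensitive); the port iterates it in first-insertion order.

-- ===== PORT A =====
def compare_dataset_schemas (schema_a : List (String × String)) (schema_b : List (String × String)) : List (String × List (String × Option String)) :=
  let da := PySem.Dict.ofList schema_a
  let db := PySem.Dict.ofList schema_b
  let all_fields : PySem.Set String := PySem.Set.union (PySem.Set.ofList da.keys) db.keys
  let result : PySem.Dict String (List (String × Option String)) :=
    all_fields.foldl (fun res field =>
      res.insert field
        (match da.get? field, db.get? field with
         | none, type_b => [("status", some "only_in_b"), ("type_a", none), ("type_b", type_b)]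
         | some type_a, none => [("status", some "only_in_a"), ("type_a", some type_a), ("type_b", none)]
         | some type_a, some type_b =>
           if type_a == type_b then
             [("status", some "match"), ("type_a", some type_a), ("type_b", some type_b)]
           else
             [("status", some "type_mismatch"), ("type_a", some type_a), ("type_b", some type_b)]))
      PySem.Dict.empty
  result.items

-- ===== PORT B =====
def compare_dataset_schemas_alt (schema_a : List (String × String)) (schema_b : List (String × String)) : List (String × List (String × Option String)) :=
  let da := PySem.Dict.ofList schema_a
  let db := PySem.Dict.ofList schema_b
  let result : PySem.Dict String (List (String × Option String)) :=
    da.items.foldl (fun res p =>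
      res.insert p.1
        (if db.contains p.1 then
          -- type_b = schema_b[field]: guarded by 'field in schema_b', so the default is never used
          let type_b := db.getD p.1 ""
          [("status", some (if p.2 == type_b then "match" else "type_mismatch")),
           ("type_a", some p.2), ("type_b", some type_b)]
         else
          [("status", some "only_in_a"), ("type_a", some p.2), ("type_b", none)]))
      PySem.Dict.empty
  let result2 :=
    (db.items.filter (fun p => !da.contains p.1)).foldl (fun res p =>
      res.insert p.1 [("status", some "only_in_b"), ("type_a", none), ("type_b", some p.2)])
      result
  result2.items

-- ===== PRECONDITION & SPEC =====
def Spec_compare_dataset_schemas (schema_a : List (String × String)) (schema_b : List (String × String)) (out : List (String × List (String × Option String))) : Prop := out = compare_dataset_schemas_alt schema_a schema_b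
instance (schema_a : List (String × String)) (schema_b : List (String × String)) (out : List (String × List (String × Option String))) : Decidable (Spec_compare_dataset_schemas schema_a schema_b out) := by unfold Spec_compare_dataset_schemas; infer_instance

-- ===== CLAIM (what is proved, stated in full; the proofs are below) =====
def Claim_equal_compare_dataset_schemas : Prop := ∀ (schema_a : List (String × String)) (schema_b : List (String × String)), Dom_compare_dataset_schemas schema_a schema_b → Spec_compare_dataset_schemas schema_a schema_b (compare_dataset_schemas schema_a schema_b)

-- ===== LEMMAS AND PROOFS =====
def rowA (da db : PySem.Dict String String) (field : String) : List (String × Option String) :=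
  match da.get? field, db.get? field with
  | none, type_b => [("status", some "only_in_b"), ("type_a", none), ("type_b", type_b)]
  | some type_a, none => [("status", some "only_in_a"), ("type_a", some type_a), ("type_b", none)]
  | some type_a, some type_b =>
    if type_a == type_b then
      [("status", some "match"), ("type_a", some type_a), ("type_b", some type_b)]
    else
      [("status", some "type_mismatch"), ("type_a", some type_a), ("type_b", some type_b)]

def rowB (db : PySem.Dict String String) (p : String × String) : List (String × Option String) :=
  if db.contains p.1 then
    let type_b := db.getD p.1 ""
    [("status", some (if p.2 == type_b then "match" else "type_mismatch")),
     ("type_a", some p.2), ("type_b", some type_b)]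
  else
    [("status", some "only_in_a"), ("type_a", some p.2), ("type_b", none)]

def rowC (p : String × String) : List (String × Option String) :=
  [("status", some "only_in_b"), ("type_a", none), ("type_b", some p.2)]

theorem compare_eq (schema_a : List (String × String)) (schema_b : List (String × String)) :
    compare_dataset_schemas schema_a schema_b = compare_dataset_schemas_alt schema_a schema_b := by
  have hndA : (PySem.Dict.ofList schema_a).keys.Nodup := PySem.Dict.nodup_keys_ofList schema_a
  have hndB : (PySem.Dict.ofList schema_b).keys.Nodup := PySem.Dict.nodup_keys_ofList schema_b
  set da := PySem.Dict.ofList schema_a with hda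
  set db := PySem.Dict.ofList schema_b with hdb
  -- the field list A iterates over
  have hfields : PySem.Set.union (PySem.Set.ofList da.keys) db.keys
      = da.keys ++ db.keys.filter (fun y => !(PySem.Set.contains da.keys y)) := by
    show PySem.Set.update (PySem.Set.ofList da.keys) db.keys = _
    rw [PySem.Set.ofList_eq_self_of_nodup da.keys hndA, PySem.Set.update_eq_append_filter,
        PySem.Set.ofList_eq_self_of_nodup db.keys hndB]
  have hndFields : ((PySem.Set.union (PySem.Set.ofList da.keys) db.keys).map (fun f => f)).Nodup := by
    rw [hfields]
    simp only [List.map_id']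
    refine List.Nodup.append hndA (hndB.filter _) ?_
    intro x hxa hxf
    have := List.of_mem_filter hxf
    simp only [Bool.not_eq_eq_eq_not, Bool.not_true, PySem.Set.contains_eq_listContains] at this
    exact absurd hxa (by simpa using this)
  -- A's result
  have hA : compare_dataset_schemas schema_a schema_b
      = PySem.Dict.empty.items
        ++ (PySem.Set.union (PySem.Set.ofList da.keys) db.keys).map (fun f => ((fun f => f) f, rowA da db f)) :=
    PySem.Dict.items_foldl_insert_fresh _ (fun f => f) (rowA da db) PySem.Dict.empty
      (fun a _ => PySem.Dict.contains_empty a) hndFields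
  -- B's first pass
  have hnd1 : (da.items.map (fun p => p.1)).Nodup := hndA
  have hB1 : (da.items.foldl (fun res p => res.insert p.1 (rowB db p)) PySem.Dict.empty).items
      = PySem.Dict.empty.items ++ da.items.map (fun p => (p.1, rowB db p)) :=
    PySem.Dict.items_foldl_insert_fresh _ (fun p => p.1) (rowB db) PySem.Dict.empty
      (fun a _ => PySem.Dict.contains_empty (ν := List (String × Option String)) a.1) hnd1
  have hkeys1 : (da.items.foldl (fun res p => res.insert p.1 (rowB db p)) PySem.Dict.empty).keys
      = da.keys := by
    have h := PySem.Dict.keys_foldl_insert_key da.items (fun p => p.1) (fun _ p => rowB db p) PySem.Dict.empty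
    rw [h]
    show PySem.Set.update [] da.keys = da.keys
    rw [PySem.Set.update_nil_left, PySem.Set.ofList_eq_self_of_nodup da.keys hndA]
  have hnd2 : ((db.items.filter (fun p => !da.contains p.1)).map (fun p => p.1)).Nodup :=
    List.Nodup.sublist ((db.items.filter_sublist (p := fun p => !da.contains p.1)).map (fun p => p.1)) hndB
  have hfresh2 : ∀ p ∈ db.items.filter (fun p => !da.contains p.1),
      (da.items.foldl (fun res p => res.insert p.1 (rowB db p)) PySem.Dict.empty).contains p.1 = false := by
    intro p hp
    have hpc := List.of_mem_filter hp
    simp only [Bool.not_eq_eq_eq_not, Bool.not_true] at hpc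
    rcases h : (da.items.foldl (fun res p => res.insert p.1 (rowB db p)) PySem.Dict.empty).contains p.1 with _ | _
    · exact h
    · have hm := (PySem.Dict.contains_iff_mem_keys _ p.1).mp h
      rw [hkeys1] at hm
      rw [(PySem.Dict.contains_iff_mem_keys da p.1).mpr hm] at hpc
      cases hpc
  have hB2 : (List.foldl (fun (res : PySem.Dict String (List (String × Option String))) p => res.insert p.1 (rowC p))
        (da.items.foldl (fun res p => res.insert p.1 (rowB db p)) PySem.Dict.empty)
        (db.items.filter (fun p => !da.contains p.1))).items
      = (da.items.foldl (fun res p => res.insert p.1 (rowB db p)) PySem.Dict.empty).items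
        ++ (db.items.filter (fun p => !da.contains p.1)).map (fun p => (p.1, rowC p)) :=
    PySem.Dict.items_foldl_insert_fresh (db.items.filter (fun p => !da.contains p.1)) (fun p => p.1)
      rowC (da.items.foldl (fun res p => res.insert p.1 (rowB db p)) PySem.Dict.empty) hfresh2 hnd2
  have halt : compare_dataset_schemas_alt schema_a schema_b
      = (List.foldl (fun (res : PySem.Dict String (List (String × Option String))) p => res.insert p.1 (rowC p))
        (da.items.foldl (fun res p => res.insert p.1 (rowB db p)) PySem.Dict.empty)
        (db.items.filter (fun p => !da.contains p.1))).items := rfl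
  -- first halves agree
  have hfst : da.keys.map (fun f => ((fun f => f) f, rowA da db f)) = da.items.map (fun p => (p.1, rowB db p)) := by
    rw [PySem.Dict.items_eq_map_keys da hndA "", List.map_map]
    refine List.map_congr_left ?_
    intro k hk
    obtain ⟨ta, hta⟩ : ∃ ta, da.get? k = some ta := by
      cases h : da.get? k with
      | none => exact absurd ((PySem.Dict.get?_eq_none_iff_not_mem_keys da k).mp h) (by simpa using hk)
      | some ta => exact ⟨ta, rfl⟩
    have hgd : da.getD k "" = ta := PySem.Dict.getD_of_get?_eq_some da "" hta
    cases hb : db.get? k with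
    | none =>
      have hc : db.contains k = false := by rw [PySem.Dict.contains_eq_isSome_get?, hb]; rfl
      simp [rowA, rowB, hta, hb, hc, hgd]
    | some tb =>
      have hc : db.contains k = true := by rw [PySem.Dict.contains_eq_isSome_get?, hb]; rfl
      have hgdb : db.getD k "" = tb := PySem.Dict.getD_of_get?_eq_some db "" hb
      by_cases hEq : ta = tb <;>
        simp [rowA, rowB, hta, hb, hc, hgd, hgdb, hEq]
  -- second halves agree
  have hsnd : (db.keys.filter (fun y => !(PySem.Set.contains da.keys y))).map (fun f => ((fun f => f) f, rowA da db f))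
      = (db.items.filter (fun p => !da.contains p.1)).map (fun p => (p.1, rowC p)) := by
    rw [PySem.Dict.items_eq_map_keys db hndB "", List.filter_map, List.map_map]
    have hpred : ∀ k ∈ db.keys, ((fun p => !da.contains p.1) ∘ (fun k => (k, db.getD k ""))) k
        = (fun y => !(PySem.Set.contains da.keys y)) k := by
      intro k _
      simp [PySem.Dict.contains_eq_decide_mem_keys, PySem.Set.contains_eq_listContains]
    rw [← List.filter_congr hpred]
    refine List.map_congr_left ?_
    intro k hk
    have hkb : k ∈ db.keys := List.mem_of_mem_filter hk
    have hknotA : da.contains k = false := by simpa using List.of_mem_filter hk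
    have hna : da.get? k = none := by
      rw [PySem.Dict.get?_eq_none_iff_not_mem_keys]
      simpa [PySem.Dict.contains_eq_decide_mem_keys] using hknotA
    obtain ⟨tb, htb⟩ : ∃ tb, db.get? k = some tb := by
      cases h : db.get? k with
      | none => exact absurd ((PySem.Dict.get?_eq_none_iff_not_mem_keys db k).mp h) (by simpa using hkb)
      | some tb => exact ⟨tb, rfl⟩
    have hgdb : db.getD k "" = tb := PySem.Dict.getD_of_get?_eq_some db "" htb
    simp [rowA, rowC, hna, htb, hgdb]
  rw [hA, halt, hB2, hB1, hfields, List.map_append, hfst, hsnd]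
  simp [PySem.Dict.empty]

-- ===== VERDICT (by name: the statement is the Claim_ definition above) =====
theorem compare_dataset_schemas_spec : Claim_equal_compare_dataset_schemas := by
  intro schema_a schema_b _
  exact compare_eq schema_a schema_b
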